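-- pv_equiv track=rewrite | github.com/Shaevitzaiden/CS513 | hw3/hw3_housing_model.py | make_binary_mapping
-- ===== SOURCE A (Python) =====
-- def make_binary_mapping(data, numeric=[]):
--     # create binarization mapping where "new_data" is lists of integers corresponding to hot indices in the binarized matrix
--     mapping = {}
--     new_data = []
--     for row in data:
--         new_row = []
--         for j, x in enumerate(row[:-1]):
--             if j in numeric:
--                 feature = (j, "numeric") # Create placeholder for numerical  values in mapping
--             else:
--                 feature = (j, x) # j is the column index and x is the value
--             if feature not in mapping: # new feature
--                 mapping[feature] = len(mapping) # insert a new feature into the index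
--             new_row.append(mapping[feature])
--     return mapping
-- ===== SOURCE B (Python) =====
-- def make_binary_mapping(data, numeric=[]):
--     # Sort-based: record each feature's first-occurrence position by a single
--     # back-to-front overwrite pass, then sort features by that position and enumerate.
--     feats = [(j, "numeric") if j in numeric else (j, x)
--              for row in data for j, x in enumerate(row[:-1])]
--     first = {}
--     for p, f in reversed(list(enumerate(feats))):
--         first[f] = p
--     return {f: i for i, (f, _) in enumerate(sorted(first.items(), key=lambda kv: kv[1]))}
-- ===== Notes on version B (the rewrite author's own statement) =====
-- stated objective: alternative
-- what changed: Replaces A's online test-and-insert dict building (with dead new_data/new_row accumulators) by a sort-based algorithm: a single back-to-front overwrite pass records each feature's first-occurrence position, then the features are sorted by that position and enumerated to assign indices.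
import Mathlib
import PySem

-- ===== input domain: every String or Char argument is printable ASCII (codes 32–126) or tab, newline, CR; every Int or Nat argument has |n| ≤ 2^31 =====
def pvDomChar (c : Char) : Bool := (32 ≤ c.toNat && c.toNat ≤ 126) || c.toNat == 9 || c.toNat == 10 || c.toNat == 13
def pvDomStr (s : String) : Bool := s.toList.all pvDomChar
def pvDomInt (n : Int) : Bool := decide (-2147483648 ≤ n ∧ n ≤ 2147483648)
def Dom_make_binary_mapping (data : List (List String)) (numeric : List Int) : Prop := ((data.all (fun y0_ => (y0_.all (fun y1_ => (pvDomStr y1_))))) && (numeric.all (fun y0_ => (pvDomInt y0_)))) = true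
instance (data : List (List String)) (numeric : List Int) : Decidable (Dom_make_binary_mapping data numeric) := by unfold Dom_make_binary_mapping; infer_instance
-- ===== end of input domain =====

-- B replaces A's online test-and-insert dict building (with dead new_data accumulators) by a
-- different algorithm: one back-to-front overwrite pass recording each feature's first-occurrence
-- position, then a sort by that position with enumerate; objective: alternative decomposition.

-- ===== PORT A =====
def make_binary_mapping (data : List (List String)) (numeric : List Int) : List (Int × String × Int) :=
  let mapping : PySem.Dict (Int × String) Int :=
    data.foldl (fun mapping row =>
      -- new_row accumulated faithfully (second component), unused afterwards like in A
      (List.foldl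
        (fun (st : PySem.Dict (Int × String) Int × List Int) jx =>
          let feature : Int × String :=
            if numeric.contains jx.1 then (jx.1, "numeric") else (jx.1, jx.2)
          let m := if st.1.contains feature then st.1 else st.1.insert feature (st.1.size : Int)
          (m, st.2 ++ [m.getD feature 0]))
        (mapping, ([] : List Int))
        (PySem.List.enumerate (PySem.List.slice row none (some (-1))) 0)).1)
      PySem.Dict.empty
  mapping.items.map (fun kv => (kv.1.1, kv.1.2, kv.2))

-- ===== PORT B =====
def make_binary_mapping_alt (data : List (List String)) (numeric : List Int) : List (Int × String × Int) :=
  let feats : List (Int × String) :=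
    data.flatMap (fun row =>
      (PySem.List.enumerate (PySem.List.slice row none (some (-1))) 0).map
        (fun jx => if numeric.contains jx.1 then (jx.1, "numeric") else (jx.1, jx.2)))
  let first : PySem.Dict (Int × String) Int :=
    ((PySem.List.enumerate feats 0).reverse).foldl (fun d pf => d.insert pf.2 pf.1) PySem.Dict.empty
  (PySem.List.enumerate (PySem.List.sorted first.items (fun kv => kv.2) false) 0).map
    (fun p => (p.2.1.1, p.2.1.2, p.1))

-- ===== PRECONDITION & SPEC =====
def Spec_make_binary_mapping (data : List (List String)) (numeric : List Int) (out : List (Int × String × Int)) : Prop := out = make_binary_mapping_alt data numeric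
instance (data : List (List String)) (numeric : List Int) (out : List (Int × String × Int)) : Decidable (Spec_make_binary_mapping data numeric out) := by unfold Spec_make_binary_mapping; infer_instance

-- ===== CLAIM =====
def Claim_equal_make_binary_mapping : Prop := ∀ (data : List (List String)) (numeric : List Int), Dom_make_binary_mapping data numeric → Spec_make_binary_mapping data numeric (make_binary_mapping data numeric)

-- ===== LEMMAS AND PROOFS =====

def pvFeat (numeric : List Int) (jx : Int × String) : Int × String :=
  if numeric.contains jx.1 then (jx.1, "numeric") else (jx.1, jx.2)

def pvStep (d : PySem.Dict (Int × String) Int) (k : Int × String) : PySem.Dict (Int × String) Int :=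
  if d.contains k then d else d.insert k (d.size : Int)

def pvDictOf (ks : List (Int × String)) : PySem.Dict (Int × String) Int :=
  PySem.Dict.mk ((PySem.List.enumerate (PySem.List.dedup ks) 0).map (fun p => (p.2, p.1)))

theorem pvInner_fst (numeric : List Int) (l : List (Int × String))
    (d : PySem.Dict (Int × String) Int) (acc : List Int) :
    (List.foldl
        (fun (st : PySem.Dict (Int × String) Int × List Int) jx =>
          let feature : Int × String :=
            if numeric.contains jx.1 then (jx.1, "numeric") else (jx.1, jx.2)
          let m := if st.1.contains feature then st.1 else st.1.insert feature (st.1.size : Int)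
          (m, st.2 ++ [m.getD feature 0])) (d, acc) l).1
    = List.foldl pvStep d (l.map (pvFeat numeric)) := by
  induction l generalizing d acc with
  | nil => rfl
  | cons x t ih =>
    rw [List.foldl_cons, List.map_cons, List.foldl_cons]
    exact ih _ _

theorem pvFoldl_flatMap {α β γ : Type} (step : γ → β → γ) (g : α → List β)
    (data : List α) (d : γ) :
    List.foldl (fun d row => List.foldl step d (g row)) d data
      = List.foldl step d (data.flatMap g) := by
  induction data generalizing d with
  | nil => rfl
  | cons r t ih => simp [List.flatMap_cons, List.foldl_append, ih]

theorem pvContains_dictOf (ps : List (Int × String)) (k : Int × String) :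
    (pvDictOf ps).contains k = (PySem.List.dedup ps).contains k := by
  have h : ∀ (l : List (Int × String)) (s : Int),
      ((PySem.List.enumerate l s).map (fun p => (p.2, p.1))).any (fun p => p.1 == k)
        = l.contains k := by
    intro l
    induction l with
    | nil => intro s; rfl
    | cons x t ih =>
      intro s
      rw [PySem.List.enumerate_cons]
      simp only [List.map_cons, List.any_cons, ih, List.contains_cons]
      rw [Bool.or_comm (k == x)]
      have hsym : (x == k) = (k == x) := by
        by_cases hxy : x = k
        · subst hxy; rfl
        · rw [beq_eq_false_iff_ne.mpr hxy, beq_eq_false_iff_ne.mpr (Ne.symm hxy)]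
      rw [hsym]
      exact Bool.or_comm _ _
  simpa [pvDictOf, PySem.Dict.contains] using h (PySem.List.dedup ps) 0

theorem pvDedup_append_singleton (ps : List (Int × String)) (k : Int × String) :
    PySem.List.dedup (ps ++ [k])
      = if (PySem.List.dedup ps).contains k then PySem.List.dedup ps
        else PySem.List.dedup ps ++ [k] := by
  simp [PySem.List.dedup, PySem.Set.ofList, List.foldl_append, PySem.Set.add,
    PySem.Set.contains]

theorem pvStep_dictOf (ps : List (Int × String)) (k : Int × String) :
    pvStep (pvDictOf ps) k = pvDictOf (ps ++ [k]) := by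
  unfold pvStep
  rw [pvContains_dictOf]
  by_cases h : (PySem.List.dedup ps).contains k = true
  · simp only [h, if_true]
    unfold pvDictOf
    rw [pvDedup_append_singleton, if_pos h]
  · rw [if_neg h]
    have hc : ((List.map (fun p => (p.2, p.1))
        (PySem.List.enumerate (PySem.List.dedup ps) 0)).any fun p => p.1 == k) = false := by
      have hco := pvContains_dictOf ps k
      simp only [pvDictOf, PySem.Dict.contains] at hco
      rw [hco]; simpa using h
    apply PySem.Dict.ext
    simp only [pvDictOf]
    rw [pvDedup_append_singleton, if_neg h]
    simp only [PySem.Dict.insert, PySem.Dict.contains, hc,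
      Bool.false_eq_true, if_false, PySem.Dict.size,
      PySem.List.enumerate_append, List.map_append, List.length_map,
      PySem.List.length_enumerate, PySem.List.enumerate_cons, PySem.List.enumerate_nil]
    simp

theorem pvFoldl_step_dictOf (ks : List (Int × String)) (ps : List (Int × String)) :
    List.foldl pvStep (pvDictOf ps) ks = pvDictOf (ps ++ ks) := by
  induction ks generalizing ps with
  | nil => simp
  | cons k t ih =>
    rw [List.foldl_cons, pvStep_dictOf, ih]
    simp

-- A's result in closed form: enumerate of the first-occurrence dedup of the feature stream.
theorem pvA_closed (data : List (List String)) (numeric : List Int) :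
    make_binary_mapping data numeric
      = (PySem.List.enumerate (PySem.List.dedup
          (data.flatMap (fun row =>
            (PySem.List.enumerate (PySem.List.slice row none (some (-1))) 0).map
              (pvFeat numeric)))) 0).map (fun p => (p.2.1, p.2.2, p.1)) := by
  unfold make_binary_mapping
  have h1 : (fun (mapping : PySem.Dict (Int × String) Int) (row : List String) =>
      (List.foldl
        (fun (st : PySem.Dict (Int × String) Int × List Int) jx =>
          let feature : Int × String :=
            if numeric.contains jx.1 then (jx.1, "numeric") else (jx.1, jx.2)
          let m := if st.1.contains feature then st.1 else st.1.insert feature (st.1.size : Int)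
          (m, st.2 ++ [m.getD feature 0]))
        (mapping, ([] : List Int))
        (PySem.List.enumerate (PySem.List.slice row none (some (-1))) 0)).1)
      = (fun mapping row => List.foldl pvStep mapping
          ((PySem.List.enumerate (PySem.List.slice row none (some (-1))) 0).map (pvFeat numeric))) := by
    funext mapping row
    exact pvInner_fst numeric _ mapping []
  rw [h1, pvFoldl_flatMap]
  have h0 : (PySem.Dict.empty : PySem.Dict (Int × String) Int) = pvDictOf [] := rfl
  rw [h0, pvFoldl_step_dictOf]
  rw [List.nil_append]
  unfold pvDictOf
  simp only [List.map_map]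
  rfl

-- ---- B-side lemmas ----

-- lookup in the overwrite fold = last write in the list, if any
theorem pvGet_foldl_insert (l : List (Int × (Int × String)))
    (d : PySem.Dict (Int × String) Int) (k : Int × String) :
    (l.foldl (fun d pf => d.insert pf.2 pf.1) d).get? k
      = match l.reverse.find? (fun pf => pf.2 == k) with
        | some pf => some pf.1
        | none => d.get? k := by
  induction l generalizing d with
  | nil => simp
  | cons a t ih =>
    rw [List.foldl_cons, ih, List.reverse_cons, List.find?_append]
    by_cases hk : a.2 = k
    · subst hk
      cases t.reverse.find? (fun pf => pf.2 == a.2) with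
      | some pf => simp
      | none => simp [List.find?, PySem.Dict.get?_insert_self]
    · have hb : (a.2 == k) = false := beq_eq_false_iff_ne.mpr hk
      cases t.reverse.find? (fun pf => pf.2 == k) with
      | some pf => simp
      | none => simp [List.find?, hb, PySem.Dict.get?_insert_of_ne _ _ (Ne.symm hk)]

-- find? over an enumerate locates the first occurrence
theorem pvFind_enumerate (xs : List (Int × String)) (k : Int × String) (s : Int)
    (hk : k ∈ xs) :
    (PySem.List.enumerate xs s).find? (fun pf => pf.2 == k)
      = some (s + (xs.idxOf k : Int), k) := by
  induction xs generalizing s with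
  | nil => cases hk
  | cons x t ih =>
    rw [PySem.List.enumerate_cons]
    by_cases hx : x = k
    · subst hx
      simp [List.find?, List.idxOf_cons_self]
    · have hb : (x == k) = false := beq_eq_false_iff_ne.mpr hx
      have hkt : k ∈ t := by
        rcases List.mem_cons.mp hk with h | h
        · exact absurd h.symm hx
        · exact h
      rw [List.find?_cons_of_neg (by simp [hb]), ih (s + 1) hkt]
      have : List.idxOf k (x :: t) = List.idxOf k t + 1 := List.idxOf_cons_ne _ (by simpa using hx)
      rw [this]
      congr 2
      push_cast
      ring

-- Set.add fold splits off a pre-seeded accumulator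
theorem pvFoldl_add_eq (t : List (Int × String)) (s : List (Int × String)) :
    List.foldl PySem.Set.add s t
      = s ++ (List.foldl PySem.Set.add [] t).filter (fun y => !(PySem.Set.contains s y)) := by
  induction t generalizing s with
  | nil => simp
  | cons x t ih =>
    rw [List.foldl_cons, List.foldl_cons, ih (PySem.Set.add s x), ih (PySem.Set.add [] x)]
    have hnil : PySem.Set.add ([] : List (Int × String)) x = [x] := rfl
    rw [hnil, List.filter_append, List.filter_filter]
    by_cases hx : x ∈ s
    · have hadd : PySem.Set.add s x = s := by
        simp [PySem.Set.add, PySem.Set.contains, hx]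
      have h1 : List.filter (fun y => !PySem.Set.contains s y) [x] = [] := by
        simp [List.filter, PySem.Set.contains, hx]
      rw [hadd, h1, List.nil_append]
      congr 1
      apply List.filter_congr
      intro y _
      by_cases hys : y ∈ s
      · simp [PySem.Set.contains, hys]
      · have hyx : y ≠ x := fun h => hys (h ▸ hx)
        simp [PySem.Set.contains, hys, hyx]
    · have hadd : PySem.Set.add s x = s ++ [x] := by
        simp [PySem.Set.add, PySem.Set.contains, hx]
      have h1 : List.filter (fun y => !PySem.Set.contains s y) [x] = [x] := by
        simp [List.filter, PySem.Set.contains, hx]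
      rw [hadd, h1, List.append_assoc]
      congr 2
      apply List.filter_congr
      intro y _
      by_cases hys : y ∈ s <;> by_cases hyx : y = x <;>
        simp [PySem.Set.contains, hys, hyx, List.mem_append]

theorem pvDedup_cons (x : Int × String) (t : List (Int × String)) :
    PySem.List.dedup (x :: t) = x :: (PySem.List.dedup t).filter (fun y => !(y == x)) := by
  have h0 : PySem.List.dedup (x :: t) = List.foldl PySem.Set.add (PySem.Set.add [] x) t := rfl
  have h1 : PySem.Set.add ([] : List (Int × String)) x = [x] := rfl
  rw [h0, h1, pvFoldl_add_eq t [x]]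
  have h2 : PySem.List.dedup t = List.foldl PySem.Set.add [] t := rfl
  rw [← h2, List.singleton_append]
  congr 1
  apply List.filter_congr
  intro y _
  simp [PySem.Set.contains, beq_eq_decide]

theorem pvPairwise_imp_mem {α : Type} (l : List α) (R S : α → α → Prop)
    (h : l.Pairwise R) (hh : ∀ a ∈ l, ∀ b ∈ l, R a b → S a b) : l.Pairwise S := by
  induction h with
  | nil => exact List.Pairwise.nil
  | cons hx ht ih =>
    exact List.Pairwise.cons (fun b hb => hh _ (by simp) _ (by simp [hb]) (hx b hb))
      (ih (fun a ha b hb => hh a (by simp [ha]) b (by simp [hb])))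

-- first occurrences are listed in strictly increasing position order
theorem pvDedup_idxOf_mono (xs : List (Int × String)) :
    (PySem.List.dedup xs).Pairwise (fun a b => xs.idxOf a < xs.idxOf b) := by
  induction xs with
  | nil => exact List.Pairwise.nil
  | cons x t ih =>
    rw [pvDedup_cons]
    refine List.Pairwise.cons ?_ ?_
    · intro b hb
      have hbx : b ≠ x := by
        have := List.of_mem_filter hb
        simpa using this
      rw [List.idxOf_cons_self, List.idxOf_cons_ne _ (Ne.symm hbx)]
      omega
    · have hf : ((PySem.List.dedup t).filter (fun y => !(y == x))).Pairwise
          (fun a b => List.idxOf a t < List.idxOf b t) := ih.sublist List.filter_sublist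
      exact pvPairwise_imp_mem _ _ _ hf (fun a ha b hb hab => by
        have hax : a ≠ x := by simpa using List.of_mem_filter ha
        have hbx : b ≠ x := by simpa using List.of_mem_filter hb
        rw [List.idxOf_cons_ne _ (Ne.symm hax), List.idxOf_cons_ne _ (Ne.symm hbx)]
        omega)

theorem pvEnumerate_map {α β : Type} (g : α → β) (l : List α) (s : Int) :
    PySem.List.enumerate (l.map g) s = (PySem.List.enumerate l s).map (fun p => (p.1, g p.2)) := by
  induction l generalizing s with
  | nil => rfl
  | cons x t ih => rw [List.map_cons, PySem.List.enumerate_cons, PySem.List.enumerate_cons, ih,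
      List.map_cons]

-- the sorted items of B's dict are exactly dedup(feats) tagged with first positions
theorem pvSorted_items (feats : List (Int × String)) :
    PySem.List.sorted
        (((PySem.List.enumerate feats 0).reverse).foldl
          (fun d pf => d.insert pf.2 pf.1) PySem.Dict.empty).items
        (fun kv => kv.2) false
      = (PySem.List.dedup feats).map (fun f => (f, (feats.idxOf f : Int))) := by
  set first := ((PySem.List.enumerate feats 0).reverse).foldl
      (fun d pf => d.insert pf.2 pf.1) (PySem.Dict.empty : PySem.Dict (Int × String) Int) with hfirst
  have hkeys : first.keys = PySem.List.dedup feats.reverse := by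
    rw [hfirst, PySem.Dict.keys_foldl_insert_key]
    simp [PySem.Dict.keys_empty, PySem.Set.update, List.map_reverse,
      PySem.List.map_snd_enumerate, PySem.List.dedup, PySem.Set.ofList]
  have hnd : first.keys.Nodup := by
    rw [hkeys]; exact PySem.List.nodup_dedup _
  have hget : ∀ k ∈ feats, first.getD k 0 = (feats.idxOf k : Int) := by
    intro k hk
    rw [hfirst, PySem.Dict.getD_eq_get?_getD, pvGet_foldl_insert, List.reverse_reverse,
      pvFind_enumerate feats k 0 hk]
    simp
  have hitems : first.items = (PySem.List.dedup feats.reverse).map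
      (fun k => (k, first.getD k 0)) := by
    rw [PySem.Dict.items_eq_map_keys first hnd 0, hkeys]
  have hmem : ∀ k, k ∈ PySem.List.dedup feats.reverse → k ∈ feats := by
    intro k hkm
    have h' : k ∈ feats.reverse := by simpa [pysem] using hkm
    exact List.mem_reverse.mp h' 
  have hitems2 : first.items = (PySem.List.dedup feats.reverse).map
      (fun f => (f, (feats.idxOf f : Int))) := by
    rw [hitems]
    apply List.map_congr_left
    intro k hkm
    rw [hget k (hmem k hkm)]
  have hperm : (PySem.List.dedup feats).Perm (PySem.List.dedup feats.reverse) := by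
    apply List.perm_of_nodup_nodup_toFinset_eq (PySem.List.nodup_dedup _) (PySem.List.nodup_dedup _)
    ext a
    simp [pysem, List.mem_reverse]
  have hperm2 : ((PySem.List.dedup feats).map (fun f => (f, (feats.idxOf f : Int)))).Perm
      first.items := by
    rw [hitems2]
    exact hperm.map _
  have hpair : (List.map (fun f => (f, (feats.idxOf f : Int))) (PySem.List.dedup feats)).Pairwise
      (fun a b => a.2 < b.2) := by
    refine List.Pairwise.map _ ?_ (pvDedup_idxOf_mono feats)
    intro a b hab
    simpa using Int.ofNat_lt.mpr hab
  exact PySem.List.sorted_eq_of_perm_of_pairwise_lt _ _ _ hperm2 hpair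

-- ===== VERDICT =====
theorem make_binary_mapping_spec : Claim_equal_make_binary_mapping := by
  intro data numeric _
  unfold Spec_make_binary_mapping make_binary_mapping_alt
  rw [pvA_closed]
  simp only [pvFeat]
  rw [pvSorted_items, pvEnumerate_map, List.map_map]
  rfl
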